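-- pv_equiv track=rewrite | github.com/T3pp31/HappyHackingTools.py_2022 | hackingtools.py | get_network_part
-- ===== SOURCE A (Python) =====
-- def get_network_part(my_ipaddr):
--     # 自身のIPアドレスを取得する方法があれば，それを使った方がユーザからの入力を待たなくていいので，いいかもしれない．　s
--     # 自身のIPアドレスとサブネットマスクからブロードキャストアドレスを求める．
--     # /24,/16に対応するため（ネットワーク部を指定できるように）に要改善．
--     # タイプCの場合
--     count = 0
--     my_ip = []
--     network_part = ""
--
--     for string in my_ipaddr:
--         if string == ".":
--             count = count + 1
--             my_ip.append(string)
--             if count == 3: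
--                 break
--         else:
--             my_ip.append(string)
--
--     for i in my_ip:
--         network_part = network_part + i
--
--     return network_part
-- ===== SOURCE B (Python) =====
-- def get_network_part(my_ipaddr):
--     parts = my_ipaddr.split(".")
--     if len(parts) <= 3:
--         return my_ipaddr
--     return ".".join(parts[:3]) + "."
-- ===== Notes on version B (the rewrite author's own statement) =====
-- stated objective: simpler
-- what changed: B tokenizes the string with split and rebuilds the first three octets with a join plus the trailing separator (or returns the input unchanged when there are fewer than three separators), instead of A's character-by-character scan with a dot counter, break, and a second string-concatenation loop.
import Mathlib
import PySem

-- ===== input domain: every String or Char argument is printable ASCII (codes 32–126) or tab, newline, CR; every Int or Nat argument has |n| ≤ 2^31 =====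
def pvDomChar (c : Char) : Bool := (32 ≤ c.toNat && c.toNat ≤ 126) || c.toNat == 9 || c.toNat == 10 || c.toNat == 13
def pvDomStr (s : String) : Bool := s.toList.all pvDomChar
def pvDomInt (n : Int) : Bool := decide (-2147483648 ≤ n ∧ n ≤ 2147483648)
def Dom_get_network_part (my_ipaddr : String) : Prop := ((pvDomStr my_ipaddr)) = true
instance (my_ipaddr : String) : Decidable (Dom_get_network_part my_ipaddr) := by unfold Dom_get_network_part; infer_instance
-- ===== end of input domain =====

-- B tokenizes on '.' and reassembles the first three octets instead of A's
-- character scan with a dot counter and a break; same return value on every input.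

-- ===== PORT A =====
-- A's for-loop with break, building my_ip front to back; the second loop
-- "for i in my_ip: network_part += i" is the String.ofList of that char list.
def pvLoopA : List Char → Int → List Char
  | [], _ => []
  | c :: rest, count =>
    if c = '.' then
      if count + 1 = 3 then ['.']
      else '.' :: pvLoopA rest (count + 1)
    else c :: pvLoopA rest count

def get_network_part (my_ipaddr : String) : String :=
  String.ofList (pvLoopA my_ipaddr.toList 0)

-- ===== PORT B =====
-- transliteration of Python's s.split(".") for the one-character separator "."
def pvSplitDot : List Char → List (List Char)
  | [] => [[]]
  | c :: rest =>
    if c = '.' then [] :: pvSplitDot rest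
    else
      match pvSplitDot rest with
      | p :: ps => (c :: p) :: ps
      | [] => [[c]]

-- transliteration of ".".join(parts)
def pvJoinDot : List (List Char) → List Char
  | [] => []
  | [p] => p
  | p :: ps => p ++ '.' :: pvJoinDot ps

def get_network_part_alt (my_ipaddr : String) : String :=
  let parts := pvSplitDot my_ipaddr.toList
  if parts.length ≤ 3 then my_ipaddr
  else String.ofList (pvJoinDot (parts.take 3) ++ ['.'])

-- ===== PRECONDITION & SPEC =====
def Spec_get_network_part (my_ipaddr : String) (out : String) : Prop := out = get_network_part_alt my_ipaddr
instance (my_ipaddr : String) (out : String) : Decidable (Spec_get_network_part my_ipaddr out) := by unfold Spec_get_network_part; infer_instance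

-- ===== CLAIM (what is proved, stated in full; the proofs are below) =====
def Claim_equal_get_network_part : Prop := ∀ (my_ipaddr : String), Dom_get_network_part my_ipaddr → Spec_get_network_part my_ipaddr (get_network_part my_ipaddr)

-- ===== LEMMAS AND PROOFS =====

theorem pvSplitDot_ne_nil (l : List Char) : pvSplitDot l ≠ [] := by
  cases l with
  | nil => simp [pvSplitDot]
  | cons c rest =>
    simp only [pvSplitDot]
    split
    · simp
    · cases h : pvSplitDot rest <;> simp

theorem pvSplitDot_dot (rest : List Char) :
    pvSplitDot ('.' :: rest) = [] :: pvSplitDot rest := by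
  simp [pvSplitDot]

theorem pvSplitDot_other (c : Char) (rest : List Char) (hc : c ≠ '.')
    (p : List Char) (ps : List (List Char)) (hh : pvSplitDot rest = p :: ps) :
    pvSplitDot (c :: rest) = (c :: p) :: ps := by
  simp [pvSplitDot, hc, hh]

theorem pvJoinDot_cons₂ (p q : List Char) (qs : List (List Char)) :
    pvJoinDot (p :: q :: qs) = p ++ '.' :: pvJoinDot (q :: qs) := rfl

theorem pvJoinDot_cons_cons (c : Char) (p : List Char) (ps : List (List Char)) :
    pvJoinDot ((c :: p) :: ps) = c :: pvJoinDot (p :: ps) := by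
  cases ps <;> simp [pvJoinDot]

-- loop invariant: with `need = 3 - count` dots still to go (1 ≤ need ≤ 3),
-- A's scan returns the whole list when it holds at most `need` pieces,
-- and otherwise the first `need` pieces rejoined with a trailing dot.
theorem pvLoopA_eq (l : List Char) (need : Nat) (h1 : 1 ≤ need) (h3 : need ≤ 3) :
    pvLoopA l ((3 : Int) - need) =
      if (pvSplitDot l).length ≤ need then l
      else pvJoinDot ((pvSplitDot l).take need) ++ ['.'] := by
  induction l generalizing need with
  | nil =>
    rw [pvLoopA, pvSplitDot, if_pos (by simpa using h1)]
  | cons c rest ih =>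
    by_cases hc : c = '.'
    · subst hc
      rw [pvSplitDot_dot]
      by_cases hn1 : need = 1
      · subst hn1
        have : pvLoopA ('.' :: rest) ((3 : Int) - (1 : Nat)) = ['.'] := by
          rw [pvLoopA]; norm_num
        rw [this]
        have hlen : 1 ≤ (pvSplitDot rest).length :=
          List.length_pos_of_ne_nil (pvSplitDot_ne_nil rest)
        rw [if_neg (by simp only [List.length_cons]; omega)]
        simp [pvJoinDot]
      · -- need ≥ 2
        have hn2 : 2 ≤ need := by omega
        have hstep : pvLoopA ('.' :: rest) ((3 : Int) - need) =
            '.' :: pvLoopA rest ((3 : Int) - (need - 1 : Nat)) := by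
          rw [pvLoopA]
          have : ¬ ((3 : Int) - need + 1 = 3) := by omega
          rw [if_pos rfl, if_neg this]
          congr 1
          congr 1
          omega
        rw [hstep, ih (need - 1) (by omega) (by omega)]
        by_cases hle : (pvSplitDot rest).length ≤ need - 1
        · rw [if_pos hle, if_pos (by simp only [List.length_cons]; omega)]
        · rw [if_neg hle, if_neg (by simp only [List.length_cons]; omega)]
          obtain ⟨k, hk⟩ : ∃ k, need = k + 1 := ⟨need - 1, by omega⟩
          subst hk
          simp only [Nat.add_sub_cancel] at *
          rw [List.take_succ_cons]
          obtain ⟨q, qs, hq⟩ : ∃ q qs, (pvSplitDot rest).take k = q :: qs := by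
            cases hh : pvSplitDot rest with
            | nil => exact absurd hh (pvSplitDot_ne_nil rest)
            | cons a as =>
              obtain ⟨m, hm⟩ : ∃ m, k = m + 1 := ⟨k - 1, by omega⟩
              exact ⟨a, as.take m, by subst hm; rw [List.take_succ_cons]⟩
          rw [hq, pvJoinDot_cons₂]
          simp
    · obtain ⟨p, ps, hh⟩ : ∃ p ps, pvSplitDot rest = p :: ps := by
        cases hh : pvSplitDot rest with
        | nil => exact absurd hh (pvSplitDot_ne_nil rest)
        | cons a as => exact ⟨a, as, rfl⟩
      rw [pvSplitDot_other c rest hc p ps hh]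
      have hstep : pvLoopA (c :: rest) ((3 : Int) - need) =
          c :: pvLoopA rest ((3 : Int) - need) := by
        rw [pvLoopA, if_neg hc]
      rw [hstep, ih need h1 h3, hh]
      by_cases hle : (p :: ps).length ≤ need
      · rw [if_pos hle, if_pos (by simpa using hle)]
      · rw [if_neg hle, if_neg (by simpa using hle)]
        obtain ⟨k, hk⟩ : ∃ k, need = k + 1 := ⟨need - 1, by omega⟩
        subst hk
        rw [List.take_succ_cons, List.take_succ_cons, pvJoinDot_cons_cons]
        simp

-- ===== VERDICT (by name: the statement is the Claim_ definition above) =====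
theorem get_network_part_spec : Claim_equal_get_network_part := by
  intro s _
  unfold Spec_get_network_part get_network_part get_network_part_alt
  have h0 : (0 : Int) = (3 : Int) - (3 : Nat) := by norm_num
  rw [h0, pvLoopA_eq s.toList 3 (by norm_num) (by norm_num)]
  by_cases hle : (pvSplitDot s.toList).length ≤ 3
  · rw [if_pos hle]
    simp [hle]
  · rw [if_neg hle]
    simp [hle]
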